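-- pv_equiv track=rewrite | github.com/rahul2333/enterprise-conversational-analytics-platform | src/security/sql_guardrails.py | _strip_leading_comments
-- ===== SOURCE A (Python) =====
-- def _strip_leading_comments(sql: str) -> str:
--     """Remove leading SQL comments so read-only checks inspect the first statement."""
--     remaining = sql.strip()
--
--     while remaining.startswith("--"):
--         newline_idx = remaining.find("\n")
--         if newline_idx == -1:
--             return ""
--         remaining = remaining[newline_idx + 1 :].lstrip()
--
--     return remaining
-- ===== SOURCE B (Python) =====
-- def _strip_leading_comments(sql: str) -> str:
--     """Remove leading SQL comments so read-only checks inspect the first statement."""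
--     lines = sql.strip().split("\n")
--     for i, line in enumerate(lines):
--         s = line.lstrip()
--         if s and not s.startswith("--"):
--             return "\n".join(lines[i:]).lstrip()
--     return ""
-- ===== Notes on version B (the rewrite author's own statement) =====
-- stated objective: alternative
-- what changed: Replaces A's while-loop of repeated startswith/find/slice/lstrip passes over the shrinking string with a single split on newlines, one forward scan for the first non-blank non-comment line, and one join+lstrip.
import Mathlib
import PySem

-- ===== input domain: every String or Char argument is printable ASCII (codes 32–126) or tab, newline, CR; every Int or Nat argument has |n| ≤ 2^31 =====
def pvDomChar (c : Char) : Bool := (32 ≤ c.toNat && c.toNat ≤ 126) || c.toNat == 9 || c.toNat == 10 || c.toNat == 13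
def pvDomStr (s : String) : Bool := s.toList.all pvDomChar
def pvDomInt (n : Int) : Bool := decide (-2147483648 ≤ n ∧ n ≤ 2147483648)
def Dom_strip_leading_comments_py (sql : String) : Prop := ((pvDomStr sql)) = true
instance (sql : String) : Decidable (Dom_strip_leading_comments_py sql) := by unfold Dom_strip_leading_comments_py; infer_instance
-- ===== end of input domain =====

-- B replaces A's repeated find/slice/lstrip loop with one split on newlines, one forward
-- scan for the first non-blank non-comment line, and one join+lstrip (objective: alternative).

-- ===== PORT A =====
-- the 'while remaining.startswith("--")' loop of A, on code points
def pvLoopA (r : List Char) : List Char :=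
  if PySem.Chars.startswith r ['-', '-'] then
    let newline_idx := PySem.Chars.find r ['\n']
    if newline_idx = -1 then []
    else pvLoopA (PySem.Chars.lstrip (PySem.List.slice r (some (newline_idx + 1)) none))
  else r
termination_by r.length
decreasing_by
  simp only [PySem.Chars.lstrip]
  have h0 : (0:Int) ≤ newline_idx + 1 := by
    have := PySem.Chars.neg_one_le_find r ['\n']
    simp only [newline_idx]; omega
  rw [PySem.List.slice_from _ h0]
  calc (List.dropWhile PySem.Chars.isspace (r.drop (newline_idx + 1).toNat)).length
      ≤ (r.drop (newline_idx + 1).toNat).length := List.length_dropWhile_le _ _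
    _ < r.length := by
        have hr : r ≠ [] := by
          intro h; subst h; simp [PySem.Chars.startswith] at *
        have : (newline_idx + 1).toNat ≥ 1 := by omega
        have := List.length_drop (l := r) (i := (newline_idx + 1).toNat)
        have : 0 < r.length := List.length_pos_iff.mpr hr
        simp [List.length_drop]; omega
def strip_leading_comments_py (sql : String) : String :=
  String.ofList (pvLoopA (PySem.Chars.strip sql.toList))

-- ===== PORT B =====
-- B's 'for i, line in enumerate(lines)' scan; the argument list is lines[i:]
def pvScanB (ls : List (List Char)) : List Char :=
  match ls with
  | [] => []
  | l :: rest =>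
    let s := PySem.Chars.lstrip l
    if !s.isEmpty && !PySem.Chars.startswith s ['-', '-'] then
      PySem.Chars.lstrip (PySem.Chars.join ['\n'] (l :: rest))
    else pvScanB rest

def strip_leading_comments_py_alt (sql : String) : String :=
  String.ofList (pvScanB (PySem.Chars.splitOn (PySem.Chars.strip sql.toList) ['\n']))

-- ===== PRECONDITION & SPEC =====
def Spec_strip_leading_comments_py (sql : String) (out : String) : Prop := out = strip_leading_comments_py_alt sql
instance (sql : String) (out : String) : Decidable (Spec_strip_leading_comments_py sql out) := by unfold Spec_strip_leading_comments_py; infer_instance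

-- ===== CLAIM (what is proved, stated in full; the proofs are below) =====
def Claim_equal_strip_leading_comments_py : Prop := ∀ (sql : String), Dom_strip_leading_comments_py sql → Spec_strip_leading_comments_py sql (strip_leading_comments_py sql)

-- ===== LEMMAS AND PROOFS =====

-- proof-side structural characterization of Chars.splitOn with a single-char separator
def pvSplitC (c : Char) : List Char → List (List Char)
  | [] => [[]]
  | a :: t => if a = c then [] :: pvSplitC c t else (pvSplitC c t).modifyHead (a :: ·)

theorem pvSplitC_ne_nil (c : Char) (l : List Char) : pvSplitC c l ≠ [] := by
  induction l with
  | nil => simp [pvSplitC]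
  | cons a t ih =>
    simp only [pvSplitC]
    split_ifs
    · simp
    · cases h : pvSplitC c t with
      | nil => exact absurd h ih
      | cons q ps => simp [List.modifyHead]

theorem pvGo_eq (c : Char) (fuel : Nat) (l cur : List Char) (acc : List (List Char))
    (hf : l.length ≤ fuel) :
    PySem.Chars.splitOn.go [c] fuel l cur acc
      = acc.reverse ++ (pvSplitC c l).modifyHead (cur.reverse ++ ·) := by
  induction fuel generalizing l cur acc with
  | zero =>
    have : l = [] := by cases l <;> simp_all
    subst this
    simp [PySem.Chars.splitOn.go, pvSplitC]
  | succ n ih =>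
    cases l with
    | nil => simp [PySem.Chars.splitOn.go, pvSplitC]
    | cons a t =>
      by_cases hac : a = c
      · subst hac
        have hpre : [a].isPrefixOf (a :: t) = true := by simp [List.isPrefixOf]
        rw [PySem.Chars.splitOn.go, if_pos hpre]
        simp only [List.length_cons, List.length_nil, Nat.zero_add, List.drop_succ_cons,
          List.drop_zero] at hf ⊢
        rw [ih t [] (cur.reverse :: acc) (by omega)]
        cases hq : pvSplitC a t with
        | nil => exact absurd hq (pvSplitC_ne_nil a t)
        | cons q ps => simp [pvSplitC, hq, List.modifyHead]
      · have hpre : [c].isPrefixOf (a :: t) = false := by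
          simp [List.isPrefixOf]; intro h; exact absurd h.symm hac
        rw [PySem.Chars.splitOn.go, if_neg (by simp [hpre])]
        simp only [List.length_cons] at hf
        rw [ih t (a :: cur) acc (by omega)]
        cases h : pvSplitC c t with
        | nil => exact absurd h (pvSplitC_ne_nil c t)
        | cons q ps => simp [pvSplitC, hac, h, List.modifyHead]

theorem pvSplitOn_eq (c : Char) (l : List Char) :
    PySem.Chars.splitOn l [c] = pvSplitC c l := by
  rw [PySem.Chars.splitOn, pvGo_eq c (l.length + 1) l [] [] (by omega)]
  cases h : pvSplitC c l with
  | nil => exact absurd h (pvSplitC_ne_nil c l)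
  | cons q ps => simp [List.modifyHead]

theorem pvJoin_splitC (c : Char) (l : List Char) :
    PySem.Chars.join [c] (pvSplitC c l) = l := by
  induction l with
  | nil => simp [pvSplitC, PySem.Chars.join, List.intercalate]
  | cons a t ih =>
    simp only [pvSplitC]
    split_ifs with hac
    · subst hac
      cases h : pvSplitC a t with
      | nil => exact absurd h (pvSplitC_ne_nil a t)
      | cons q ps =>
        rw [h] at ih
        rw [PySem.Chars.join_cons_cons]
        simp [ih]
    · cases h : pvSplitC c t with
      | nil => exact absurd h (pvSplitC_ne_nil c t)
      | cons q ps =>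
        rw [h] at ih
        cases ps with
        | nil =>
          simp only [List.modifyHead]
          rw [PySem.Chars.join_singleton] at ih ⊢
          simp [ih]
        | cons q2 ps2 =>
          simp only [List.modifyHead]
          rw [PySem.Chars.join_cons_cons] at ih ⊢
          simp [← ih]

theorem pvSplitC_no_sep (c : Char) (l : List Char) :
    ∀ p ∈ pvSplitC c l, c ∉ p := by
  induction l with
  | nil => simp [pvSplitC]
  | cons a t ih =>
    simp only [pvSplitC]
    split_ifs with hac
    · intro p hp
      rcases List.mem_cons.mp hp with h | h
      · subst h; simp
      · exact ih p h
    · cases h : pvSplitC c t with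
      | nil => exact absurd h (pvSplitC_ne_nil c t)
      | cons q ps =>
        rw [h] at ih
        intro p hp
        simp only [List.modifyHead] at hp
        rcases List.mem_cons.mp hp with h2 | h2
        · subst h2
          intro hm
          rcases List.mem_cons.mp hm with h3 | h3
          · exact hac h3.symm
          · exact ih q (by simp) h3
        · exact ih p (by simp [h2])

-- [a] is an infix iff a is a member
theorem pvSingleton_infix_iff (a : Char) (l : List Char) : [a] <:+: l ↔ a ∈ l := by
  constructor
  · intro h
    obtain ⟨t, hp, hs⟩ := List.infix_iff_prefix_suffix.mp h
    exact hs.subset (hp.subset (by simp))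
  · intro h
    rcases List.mem_iff_append.mp h with ⟨s, t, rfl⟩
    exact ⟨s, t, by simp⟩

theorem pvFind_eq_neg_one (d : List Char) (hn : '\n' ∉ d) :
    PySem.Chars.find d ['\n'] = -1 := by
  rw [PySem.Chars.find_eq_neg_one_iff]
  intro h
  exact hn ((pvSingleton_infix_iff _ _).mp h)

theorem pvFind_append (d t : List Char) (hn : '\n' ∉ d) :
    PySem.Chars.find (d ++ '\n' :: t) ['\n'] = (d.length : Int) := by
  have hmem : '\n' ∈ d ++ '\n' :: t := by simp
  have h0 : 0 ≤ PySem.Chars.find (d ++ '\n' :: t) ['\n'] :=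
    (PySem.Chars.find_nonneg_iff _ _).mpr ((pvSingleton_infix_iff _ _).mpr hmem)
  obtain ⟨hpre, hmin⟩ := PySem.Chars.find_spec h0
  set i := (PySem.Chars.find (d ++ '\n' :: t) ['\n']).toNat with hi
  have hle : i ≤ d.length := by
    by_contra hlt
    exact hmin d.length (by omega) ⟨t, by simp⟩
  have hge : ¬ i < d.length := by
    intro hlt
    have hlen : i < (d ++ '\n' :: t).length := by simp; omega
    have hdL : List.drop i (d ++ '\n' :: t)
        = (d ++ '\n' :: t)[i]'hlen :: List.drop (i + 1) (d ++ '\n' :: t) :=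
      List.drop_eq_getElem_cons hlen
    rcases hpre with ⟨w, hw⟩
    rw [hdL] at hw
    have hL : (d ++ '\n' :: t)[i]'hlen = '\n' := by
      have h1 := congrArg List.head? hw
      simp at h1
      simpa [List.getElem?_eq_getElem hlen] using h1.symm
    have hLd : (d ++ '\n' :: t)[i]'hlen = d[i]'hlt := List.getElem_append_left hlt
    have hmemd : d[i]'hlt ∈ d := List.getElem_mem hlt
    rw [hLd] at hL
    exact hn (hL ▸ hmemd)
  have hieq : (PySem.Chars.find (d ++ '\n' :: t) ['\n']).toNat = d.length := by omega
  omega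

theorem pvLstrip_append_allspace (l u : List Char) (h : ∀ x ∈ l, PySem.Chars.isspace x) :
    PySem.Chars.lstrip (l ++ u) = PySem.Chars.lstrip u := by
  simp only [PySem.Chars.lstrip, List.dropWhile_append]
  rw [if_pos]
  simp [List.dropWhile_eq_nil_iff.mpr h]

theorem pvLstrip_append_ne_nil (l u : List Char) (h : PySem.Chars.lstrip l ≠ []) :
    PySem.Chars.lstrip (l ++ u) = PySem.Chars.lstrip l ++ u := by
  simp only [PySem.Chars.lstrip, List.dropWhile_append] at *
  rw [if_neg]
  simpa using h

theorem pvLstrip_strip (s : List Char) :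
    PySem.Chars.lstrip (PySem.Chars.strip s) = PySem.Chars.strip s := by
  simp only [PySem.Chars.strip, PySem.Chars.rstrip, PySem.Chars.lstrip]
  cases h : List.dropWhile PySem.Chars.isspace s with
  | nil => simp
  | cons a t =>
    have ha : ¬ PySem.Chars.isspace a := by
      have := List.head?_dropWhile_not PySem.Chars.isspace s
      rw [h] at this
      simpa using this
    have hpre : (List.dropWhile PySem.Chars.isspace (a :: t).reverse).reverse <+: (a :: t) := by
      have hsf : List.dropWhile PySem.Chars.isspace (a :: t).reverse <:+ (a :: t).reverse :=
        List.dropWhile_suffix _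
      rcases hsf with ⟨w, hw⟩
      exact ⟨w.reverse, by rw [← List.reverse_append, hw, List.reverse_reverse]⟩
    cases hr : (List.dropWhile PySem.Chars.isspace (a :: t).reverse).reverse with
    | nil => simp
    | cons b u =>
      rw [hr] at hpre
      have hb : b = a := (List.cons_prefix_cons.mp hpre).1
      subst hb
      simp [ha]

-- the heart: A's while-loop on the lstripped join equals B's line scan
theorem pvLoop_eq_scan (ls : List (List Char)) (h : ∀ p ∈ ls, '\n' ∉ p) :
    pvLoopA (PySem.Chars.lstrip (PySem.Chars.join ['\n'] ls)) = pvScanB ls := by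
  induction ls with
  | nil =>
    simp [PySem.Chars.join, List.intercalate, PySem.Chars.lstrip, pvScanB]
    rw [pvLoopA]
    simp [PySem.Chars.startswith, List.isPrefixOf]
  | cons l rest ih =>
    have hl : '\n' ∉ l := h l (by simp)
    have hrest : ∀ p ∈ rest, '\n' ∉ p := fun p hp => h p (by simp [hp])
    have hdsub : '\n' ∉ PySem.Chars.lstrip l := fun hm =>
      hl ((List.dropWhile_sublist _).subset hm)
    cases hrest0 : rest with
    | nil =>
      rw [PySem.Chars.join_singleton]
      simp only [pvScanB]
      cases hd : PySem.Chars.lstrip l with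
      | nil =>
        rw [pvLoopA]
        simp [PySem.Chars.startswith, List.isPrefixOf]
      | cons a t =>
        rw [hd] at hdsub
        by_cases hcm : PySem.Chars.startswith (a :: t) ['-', '-']
        · rw [pvLoopA, if_pos hcm]
          have hfneg : PySem.Chars.find (a :: t) ['\n'] = -1 :=
            pvFind_eq_neg_one _ hdsub
          simp [hfneg, hcm]
        · rw [pvLoopA, if_neg hcm]
          rw [PySem.Chars.join_singleton]
          simp [hd, hcm]
    | cons r0 rs =>
      rw [← hrest0]
      have hne : rest ≠ [] := by simp [hrest0]
      have hjoin : PySem.Chars.join ['\n'] (l :: rest)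
          = l ++ '\n' :: PySem.Chars.join ['\n'] rest := by
        rw [hrest0, PySem.Chars.join_cons_cons]; simp
      rw [hjoin]
      cases hd : PySem.Chars.lstrip l with
      | nil =>
        have hsp : ∀ x ∈ l, PySem.Chars.isspace x := List.dropWhile_eq_nil_iff.mp hd
        rw [pvLstrip_append_allspace l _ hsp]
        have : PySem.Chars.lstrip ('\n' :: PySem.Chars.join ['\n'] rest)
            = PySem.Chars.lstrip (PySem.Chars.join ['\n'] rest) := by
          simp [PySem.Chars.lstrip, PySem.Chars.isspace]
        rw [this, ih hrest]
        simp [pvScanB, hd]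
      | cons a t =>
        rw [hd] at hdsub
        rw [pvLstrip_append_ne_nil l _ (by simp [hd]), hd]
        by_cases hcm : PySem.Chars.startswith (a :: t) ['-', '-']
        · rw [pvLoopA, if_pos (by
            rcases (PySem.Chars.startswith_iff _ _).mp hcm with ⟨w, hw⟩
            exact (PySem.Chars.startswith_iff _ _).mpr ⟨w ++ '\n' :: PySem.Chars.join ['\n'] rest, by
              rw [← List.append_assoc, hw]⟩)]
          have hfind : PySem.Chars.find ((a :: t) ++ '\n' :: PySem.Chars.join ['\n'] rest) ['\n']
              = ((t.length + 1 : Nat) : Int) := by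
            rw [pvFind_append _ _ hdsub]; simp
          simp only [List.cons_append] at hfind ⊢
          simp only [hfind]
          rw [if_neg (by omega)]
          rw [show ((t.length + 1 : Nat) : Int) + 1 = ((t.length + 2 : Nat) : Int) by push_cast; ring]
          rw [PySem.List.slice_from _ (by omega)]
          simp only [Int.toNat_natCast]
          have hdrop : List.drop (t.length + 2) (a :: (t ++ '\n' :: PySem.Chars.join ['\n'] rest))
              = PySem.Chars.join ['\n'] rest := by
            rw [show a :: (t ++ '\n' :: PySem.Chars.join ['\n'] rest)
                = ((a :: t) ++ ['\n']) ++ PySem.Chars.join ['\n'] rest by simp,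
              show t.length + 2 = ((a :: t) ++ ['\n']).length by simp]
            exact List.drop_left
          rw [hdrop, ih hrest]
          simp [pvScanB, hd, hcm]
        · have hcm2 : ¬ PySem.Chars.startswith ((a :: t) ++ '\n' :: PySem.Chars.join ['\n'] rest)
              ['-', '-'] := by
            cases t with
            | nil =>
              simp [PySem.Chars.startswith, List.isPrefixOf]
            | cons b t2 =>
              simp only [PySem.Chars.startswith, List.cons_append, List.isPrefixOf] at hcm ⊢
              simpa using hcm
          rw [pvLoopA, if_neg hcm2]
          simp only [pvScanB, hd]
          rw [if_pos (by simp [hcm])]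
          rw [hjoin, pvLstrip_append_ne_nil l _ (by simp [hd]), hd]

-- ===== VERDICT (by name: the statement is the Claim_ definition above) =====
theorem strip_leading_comments_py_spec : Claim_equal_strip_leading_comments_py := by
  intro sql _
  unfold Spec_strip_leading_comments_py strip_leading_comments_py strip_leading_comments_py_alt
  congr 1
  rw [pvSplitOn_eq '\n' (PySem.Chars.strip sql.toList)]
  rw [← pvLoop_eq_scan _ (pvSplitC_no_sep '\n' (PySem.Chars.strip sql.toList))]
  rw [pvJoin_splitC, pvLstrip_strip]
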